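-- pv_equiv track=rewrite | github.com/sundar91/dsa | Bitwise/intresting-array.py | solve
-- ===== SOURCE A (Python) =====
-- def solve(A):
--     if len(A) <= 1:
--         return "No"
--
--     xr = A[0]
--     for i in range(1, len(A)):
--         xr ^= A[i]
--
--     if xr % 2 == 0:
--         return "Yes"
--     else:
--         return "No"
-- ===== SOURCE B (Python) =====
-- def solve(A):
--     if len(A) <= 1:
--         return "No"
--     return "Yes" if sum(A) % 2 == 0 else "No"
-- ===== Notes on version B (the rewrite author's own statement) =====
-- stated objective: idiomatic
-- what changed: B drops the bitwise machinery entirely: instead of folding XOR across the array and testing its parity, it tests the parity of the plain arithmetic sum(A) via one builtin call (parity of XOR equals parity of the sum), with no explicit loop or bit operation.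
import Mathlib
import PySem

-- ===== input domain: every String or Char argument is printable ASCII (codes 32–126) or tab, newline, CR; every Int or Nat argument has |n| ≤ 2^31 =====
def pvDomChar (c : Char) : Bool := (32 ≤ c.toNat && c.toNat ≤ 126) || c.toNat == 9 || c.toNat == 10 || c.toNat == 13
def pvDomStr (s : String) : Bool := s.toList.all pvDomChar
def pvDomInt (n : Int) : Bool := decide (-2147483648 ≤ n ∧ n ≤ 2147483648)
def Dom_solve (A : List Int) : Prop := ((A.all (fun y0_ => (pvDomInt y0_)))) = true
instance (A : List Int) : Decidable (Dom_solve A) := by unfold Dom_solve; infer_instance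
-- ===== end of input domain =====

-- B drops the bitwise machinery: it tests the parity of the arithmetic sum(A)
-- (parity of XOR = parity of the sum); objective: idiomatic.

-- ===== PORT A =====
def solve (A : List Int) : String :=
  if A.length ≤ 1 then "No"
  else
    let xr := (PySem.List.pyRange 1 (A.length : Int) 1).foldl
      (fun xr i => PySem.Int.bxor xr (PySem.List.pyGetD A i 0)) (PySem.List.pyGetD A 0 0)
    if PySem.Int.mod xr 2 = 0 then "Yes" else "No"

-- ===== PORT B =====
def solve_alt (A : List Int) : String :=
  if A.length ≤ 1 then "No"
  else if PySem.Int.mod A.sum 2 = 0 then "Yes" else "No"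

-- ===== PRECONDITION & SPEC =====
def Spec_solve (A : List Int) (out : String) : Prop := out = solve_alt A
instance (A : List Int) (out : String) : Decidable (Spec_solve A out) := by unfold Spec_solve; infer_instance

-- ===== CLAIM (what is proved, stated in full; the proofs are below) =====
def Claim_equal_solve : Prop := ∀ (A : List Int), Dom_solve A → Spec_solve A (solve A)

-- ===== LEMMAS AND PROOFS =====

-- Parity of a bitwise XOR is the parity of the sum.
lemma bxor_emod_two (a b : Int) : PySem.Int.bxor a b % 2 = (a + b) % 2 := by
  unfold PySem.Int.bxor
  split_ifs with h1 h2 h2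
  · have h := Nat.xor_mod_two_eq (m := a.toNat) (n := b.toNat); omega
  · have h := Nat.xor_mod_two_eq (m := a.toNat) (n := (-b - 1).toNat); omega
  · have h := Nat.xor_mod_two_eq (m := (-a - 1).toNat) (n := b.toNat); omega
  · have h := Nat.xor_mod_two_eq (m := (-a - 1).toNat) (n := (-b - 1).toNat); omega

-- A's XOR fold has the parity of init plus the sum of the elements.
lemma xorfold_emod_two (l : List Int) (x : Int) :
    l.foldl PySem.Int.bxor x % 2 = (x + l.sum) % 2 := by
  induction l generalizing x with
  | nil => simp
  | cons y l ih =>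
    simp only [List.foldl_cons, List.sum_cons, ih]
    have h := bxor_emod_two x y
    omega

-- ===== VERDICT (by name: the statement is the Claim_ definition above) =====
theorem solve_spec : Claim_equal_solve := by
  intro A _
  unfold Spec_solve solve solve_alt
  by_cases hlen : A.length ≤ 1
  · simp [hlen]
  · simp only [hlen, if_false]
    match A, hlen with
    | a :: rest, _ =>
      rw [PySem.List.foldl_pyRange_pyGetD' (a :: rest) 0 PySem.Int.bxor (PySem.List.pyGetD (a :: rest) 0 0) (a := 1) (by omega)]
      have hget : PySem.List.pyGetD (a :: rest) 0 0 = a := by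
        simp [PySem.List.pyGetD, PySem.List.pyGet?, PySem.List.pyIdx?]
      rw [PySem.Int.mod_eq_emod_of_pos (by omega),
        xorfold_emod_two (((a :: rest)).drop (Int.toNat 1)) _, hget,
        PySem.Int.mod_eq_emod_of_pos (by omega)]
      have hsum : a + (((a :: rest)).drop (Int.toNat 1)).sum = (a :: rest).sum := by simp
      rw [hsum]
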